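-- pv_equiv track=rewrite | github.com/aessayeg/ytempire-mvp | ml-pipeline/src/personalization_model.py | _extract_title_patterns
-- ===== SOURCE A (Python) =====
-- from typing import Any, Dict, List, Optional, Tuple
--
-- def _extract_title_patterns(titles: List[str]) -> List[str]:
--     """Extract common patterns from titles"""
--     patterns = []
--
--     # Common title formats
--     if any('|' in t for t in titles):
--         patterns.append('pipe_separator')
--     if any(':' in t for t in titles):
--         patterns.append('colon_separator')
--     if any('?' in t for t in titles):
--         patterns.append('question_format')
--     if any(t.isupper() for t in titles):
--         patterns.append('all_caps')
--     if any(any(char.isdigit() for char in t) for t in titles):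
--         patterns.append('contains_numbers')
--
--     return patterns
-- ===== SOURCE B (Python) =====
-- from typing import List
--
-- def _extract_title_patterns(titles: List[str]) -> List[str]:
--     """Extract common patterns from titles (single pass maintaining flags)."""
--     has_pipe = has_colon = has_question = has_caps = has_number = False
--     for t in titles:
--         has_pipe = has_pipe or '|' in t
--         has_colon = has_colon or ':' in t
--         has_question = has_question or '?' in t
--         has_caps = has_caps or t.isupper()
--         has_number = has_number or any(char.isdigit() for char in t)
--     patterns = []
--     if has_pipe:
--         patterns.append('pipe_separator')
--     if has_colon:
--         patterns.append('colon_separator')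
--     if has_question:
--         patterns.append('question_format')
--     if has_caps:
--         patterns.append('all_caps')
--     if has_number:
--         patterns.append('contains_numbers')
--     return patterns
-- ===== Notes on version B (the rewrite author's own statement) =====
-- stated objective: alternative
-- what changed: Replaces five independent any(...) scans over the title list with one traversal that maintains five boolean flags, then emits the pattern names from the flags in the original order.
import Mathlib
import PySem

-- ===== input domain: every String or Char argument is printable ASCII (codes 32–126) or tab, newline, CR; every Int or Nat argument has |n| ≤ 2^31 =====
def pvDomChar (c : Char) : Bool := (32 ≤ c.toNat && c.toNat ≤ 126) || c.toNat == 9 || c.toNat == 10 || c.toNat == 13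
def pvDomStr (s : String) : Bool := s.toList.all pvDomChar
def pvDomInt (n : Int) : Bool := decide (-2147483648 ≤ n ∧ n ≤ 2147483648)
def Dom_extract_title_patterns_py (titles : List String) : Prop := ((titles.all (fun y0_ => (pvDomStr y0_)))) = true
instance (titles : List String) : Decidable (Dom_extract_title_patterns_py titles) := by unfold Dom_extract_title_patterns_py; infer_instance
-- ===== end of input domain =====

-- B replaces A's five independent any(...) scans with one pass keeping five boolean flags (alternative decomposition, same output).

-- hand port of str.isupper (exact on the ASCII domain, where the cased characters are exactly the letters):
-- at least one cased character and no lowercase one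
def pyStrIsupper (s : String) : Bool :=
  s.toList.any (fun c => PySem.Chars.isalpha c) && s.toList.all (fun c => !(PySem.Chars.islower c))

-- ===== PORT A =====
def extract_title_patterns_py (titles : List String) : List String :=
  let patterns : List String := []
  let patterns := if titles.any (fun t => PySem.Str.isIn "|" t) then patterns ++ ["pipe_separator"] else patterns
  let patterns := if titles.any (fun t => PySem.Str.isIn ":" t) then patterns ++ ["colon_separator"] else patterns
  let patterns := if titles.any (fun t => PySem.Str.isIn "?" t) then patterns ++ ["question_format"] else patterns
  let patterns := if titles.any (fun t => pyStrIsupper t) then patterns ++ ["all_caps"] else patterns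
  let patterns := if titles.any (fun t => t.toList.any (fun c => PySem.Chars.isdigit c)) then patterns ++ ["contains_numbers"] else patterns
  patterns

-- ===== PORT B =====
def extract_title_patterns_py_alt (titles : List String) : List String :=
  let flags := titles.foldl
    (fun (f : Bool × Bool × Bool × Bool × Bool) t =>
      (f.1 || PySem.Str.isIn "|" t,
       f.2.1 || PySem.Str.isIn ":" t,
       f.2.2.1 || PySem.Str.isIn "?" t,
       f.2.2.2.1 || pyStrIsupper t,
       f.2.2.2.2 || t.toList.any (fun c => PySem.Chars.isdigit c)))
    (false, false, false, false, false)
  let patterns : List String := []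
  let patterns := if flags.1 then patterns ++ ["pipe_separator"] else patterns
  let patterns := if flags.2.1 then patterns ++ ["colon_separator"] else patterns
  let patterns := if flags.2.2.1 then patterns ++ ["question_format"] else patterns
  let patterns := if flags.2.2.2.1 then patterns ++ ["all_caps"] else patterns
  let patterns := if flags.2.2.2.2 then patterns ++ ["contains_numbers"] else patterns
  patterns

-- ===== PRECONDITION & SPEC =====
def Spec_extract_title_patterns_py (titles : List String) (out : List String) : Prop := out = extract_title_patterns_py_alt titles
instance (titles : List String) (out : List String) : Decidable (Spec_extract_title_patterns_py titles out) := by unfold Spec_extract_title_patterns_py; infer_instance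

-- ===== CLAIM (what is proved, stated in full; the proofs are below) =====
def Claim_equal_extract_title_patterns_py : Prop := ∀ (titles : List String), Dom_extract_title_patterns_py titles → Spec_extract_title_patterns_py titles (extract_title_patterns_py titles)

-- ===== LEMMAS AND PROOFS =====

-- the flag fold computes the disjunction of each per-title test over the list
theorem flags_eq (titles : List String) (f : Bool × Bool × Bool × Bool × Bool) :
    titles.foldl
      (fun (f : Bool × Bool × Bool × Bool × Bool) t =>
        (f.1 || PySem.Str.isIn "|" t,
         f.2.1 || PySem.Str.isIn ":" t,
         f.2.2.1 || PySem.Str.isIn "?" t,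
         f.2.2.2.1 || pyStrIsupper t,
         f.2.2.2.2 || t.toList.any (fun c => PySem.Chars.isdigit c))) f
    = (f.1 || titles.any (fun t => PySem.Str.isIn "|" t),
       f.2.1 || titles.any (fun t => PySem.Str.isIn ":" t),
       f.2.2.1 || titles.any (fun t => PySem.Str.isIn "?" t),
       f.2.2.2.1 || titles.any (fun t => pyStrIsupper t),
       f.2.2.2.2 || titles.any (fun t => t.toList.any (fun c => PySem.Chars.isdigit c))) := by
  induction titles generalizing f with
  | nil => simp
  | cons t rest ih => rw [List.foldl_cons, ih]; simp [Bool.or_assoc]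

-- ===== VERDICT (by name: the statement is the Claim_ definition above) =====
theorem extract_title_patterns_py_spec : Claim_equal_extract_title_patterns_py := by
  intro titles _
  unfold Spec_extract_title_patterns_py extract_title_patterns_py extract_title_patterns_py_alt
  rw [flags_eq]
  simp
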